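-- pv_equiv track=rewrite | github.com/youyouzh/PythonPractice | spider/lyshark/lyshark_article_crawler.py | extract_best_match_title
-- ===== SOURCE A (Python) =====
-- from typing import List
--
-- def calculate_longest_common_substr_ratio(str1: str, str2: str) -> int:
--     """
--     计算两个字符串的相似度，忽略空格
--     把两个字符串分别以行和列组成一个二维矩阵；比较二维矩阵中每个点对应行列字符中否相等，相等的话值设置为1，否则设置为0
--     计算某个二维矩阵的值的时候顺便计算出来当前最长的公共子串的长度
--     :param str1: 原字符串
--     :param str2: 目标字符串
--     :return: 相识度，0-100，数字越大越相似
--     """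
--     str1 = str1.replace(' ', '')
--     str2 = str2.replace(' ', '')
--
--     if len(str1) >= len(str2):
--         str1, str2 = str2, str1
--
--     max_match_count = 0
--     for i in range(len(str1)):
--         current_match_count = 0
--         for j in range(len(str2)):
--             if i + current_match_count >= len(str1):
--                 break
--             if str1[i + current_match_count] == str2[j]:
--                 current_match_count += 1
--                 max_match_count = max(max_match_count, current_match_count)
--             j += 1
--         i += 1
--     return int(max_match_count / len(str1) * 100)
--
-- def extract_best_match_title(toc_title: str, article_titles: List[str]) -> str | None:
--     """
--     查找最匹配的标题
--     :param toc_title: 目录中的标题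
--     :param article_titles: 文章中的标题
--     :return:
--     """
--     # 遍历查找相同字符最多的标题为匹配标题
--     max_same_ratio = 0
--     best_match_title = None
--     for article_title in article_titles:
--         ratio = calculate_longest_common_substr_ratio(toc_title, article_title)
--         if ratio > max_same_ratio:
--             max_same_ratio = ratio
--             best_match_title = article_title
--     return best_match_title if max_same_ratio >= 40 else None
-- ===== SOURCE B (Python) =====
-- from typing import List
--
--
-- def _greedy_match_ratio(str1: str, str2: str) -> int:
--     # Same similarity measure, computed by consuming a shrinking suffix of the
--     # longer string with str.find jumps instead of rescanning it char by char.
--     s1 = str1.replace(' ', '')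
--     s2 = str2.replace(' ', '')
--     if len(s1) >= len(s2):
--         s1, s2 = s2, s1
--     best = 0
--     for i in range(len(s1)):
--         rest = s2
--         count = 0
--         for ch in s1[i:]:
--             k = rest.find(ch)
--             if k < 0:
--                 break
--             rest = rest[k + 1:]
--             count += 1
--         best = max(best, count)
--     return int(best / len(s1) * 100)
--
--
-- def extract_best_match_title(toc_title: str, article_titles: List[str]) -> str | None:
--     if not article_titles:
--         return None
--     ratio, best = max(((_greedy_match_ratio(toc_title, t), t) for t in article_titles),
--                       key=lambda p: p[0])
--     return best if ratio >= 40 else None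
-- ===== Notes on version B (the rewrite author's own statement) =====
-- stated objective: faster
-- what changed: The similarity helper no longer rescans every character of the longer string per start position: it consumes a shrinking suffix of the longer string with str.find jumps (stopping as soon as a needed character is missing), and the entry loop becomes a single max() with a key instead of a manual running-max/best pair.
import Mathlib
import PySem

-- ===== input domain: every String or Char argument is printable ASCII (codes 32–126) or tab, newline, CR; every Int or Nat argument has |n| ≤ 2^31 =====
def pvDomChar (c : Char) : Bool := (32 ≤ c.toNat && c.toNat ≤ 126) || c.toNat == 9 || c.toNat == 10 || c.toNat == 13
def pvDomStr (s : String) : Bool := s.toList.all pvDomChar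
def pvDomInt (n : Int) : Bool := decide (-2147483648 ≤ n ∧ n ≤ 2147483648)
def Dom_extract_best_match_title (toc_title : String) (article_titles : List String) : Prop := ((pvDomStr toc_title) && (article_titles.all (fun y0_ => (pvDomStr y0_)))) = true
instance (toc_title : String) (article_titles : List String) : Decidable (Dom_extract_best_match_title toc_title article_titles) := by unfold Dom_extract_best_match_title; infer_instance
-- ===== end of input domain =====

-- B rewrites the similarity helper: instead of rescanning the whole longer string for every
-- position (A's inner for-loop over all of str2), it consumes a shrinking suffix of the longer
-- string with find-jumps, and the entry loop becomes a single max with a key.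

-- Shared exact port of Python's `int(m / n * 100)` (true division is IEEE-754 double division;
-- both Source A and Source B end in this very expression, so both ports use this helper).
-- pvRn num den rounds num/den (num ≥ 0, den > 0) to a 53-bit significand, round-to-nearest-even:
-- result (q, e) means the double q * 2^e.
def pvRn (num den : Nat) : Nat × Int :=
  if num = 0 then (0, 0)
  else
    let nb := Nat.size num
    let db := Nat.size den
    let N := if nb ≤ 53 + db then num * 2 ^ (53 + db - nb) else num
    let D := if nb ≤ 53 + db then den else den * 2 ^ (nb - (53 + db))
    let q := N / D
    let r := N % D
    let e : Int := (nb : Int) - (53 + db)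
    if 53 < Nat.size q then
      let rem2 := (q % 2) * D + r
      let q1 := q / 2
      let q2 := if 2 * D < 2 * rem2 ∨ (2 * rem2 = 2 * D ∧ q1 % 2 = 1) then q1 + 1 else q1
      if 53 < Nat.size q2 then (q2 / 2, e + 2) else (q2, e + 1)
    else
      let q2 := if D < 2 * r ∨ (2 * r = D ∧ q % 2 = 1) then q + 1 else q
      if 53 < Nat.size q2 then (q2 / 2, e + 1) else (q2, e)

-- int(m / n * 100): round m/n to double, multiply by 100 (one more rounding), truncate toward 0.
def pvIntRatio100 (m n : Int) : Int :=
  let p1 := pvRn m.toNat n.toNat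
  if p1.1 = 0 then 0
  else
    let p2 := pvRn (p1.1 * 100) 1
    let e2 := p2.2 + p1.2
    if 0 ≤ e2 then ((p2.1 * 2 ^ e2.toNat : Nat) : Int) else ((p2.1 / 2 ^ (-e2).toNat : Nat) : Int)

-- ===== PORT A =====
-- calculate_longest_common_substr_ratio; the Python `break` is modelled by a no-op branch:
-- once i + current_match_count >= len(str1) the state never changes again, so skipping the
-- remaining j iterations returns the same state.  (The dead `j += 1` / `i += 1` rebind the
-- loop variable just before the for-statement overwrites it; they have no effect.)
def pvCalcA (str1 str2 : String) : Int :=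
  let t1 := (PySem.Str.replace str1 " " "").toList
  let t2 := (PySem.Str.replace str2 " " "").toList
  let p := if t1.length ≥ t2.length then (t2, t1) else (t1, t2)
  let a := p.1
  let b := p.2
  let maxc :=
    (PySem.List.pyRange 0 a.length 1).foldl
      (fun maxc i =>
        ((PySem.List.pyRange 0 b.length 1).foldl
          (fun (st : Int × Int) j =>
            if (a.length : Int) ≤ i + st.2 then st
            else if PySem.List.pyGetD a (i + st.2) ' ' == PySem.List.pyGetD b j ' ' then
              (max st.1 (st.2 + 1), st.2 + 1)
            else st)
          (maxc, (0 : Int))).1)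
      (0 : Int)
  pvIntRatio100 maxc (a.length : Int)

def extract_best_match_title (toc_title : String) (article_titles : List String) : Option String :=
  let st := article_titles.foldl
    (fun (st : Int × Option String) article_title =>
      let ratio := pvCalcA toc_title article_title
      if st.1 < ratio then (ratio, some article_title) else st)
    ((0 : Int), (none : Option String))
  if (40 : Int) ≤ st.1 then st.2 else none

-- ===== PORT B =====
-- Source B's inner `for ch in s1[i:]` with break: structural recursion over the needed characters,
-- consuming `rest` via find-jumps.
def pvMatch (rest : List Char) (need : List Char) : Nat :=
  match need with
  | [] => 0
  | ch :: t =>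
    let k := PySem.Chars.find rest [ch]
    if k < 0 then 0
    else 1 + pvMatch (PySem.List.slice rest (some (k + 1)) none) t

def pvSimB (str1 str2 : String) : Int :=
  let t1 := (PySem.Str.replace str1 " " "").toList
  let t2 := (PySem.Str.replace str2 " " "").toList
  let p := if t1.length ≥ t2.length then (t2, t1) else (t1, t2)
  let a := p.1
  let b := p.2
  let best :=
    (PySem.List.pyRange 0 a.length 1).foldl
      (fun best i => max best ((pvMatch b (PySem.List.slice a (some i) none) : Nat) : Int))
      (0 : Int)
  pvIntRatio100 best (a.length : Int)

def extract_best_match_title_alt (toc_title : String) (article_titles : List String) : Option String :=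
  if article_titles.isEmpty then none
  else
    match PySem.List.max? (article_titles.map (fun t => (pvSimB toc_title t, t))) (fun p => p.1) with
    | none => none
    | some p => if (40 : Int) ≤ p.1 then some p.2 else none

-- ===== PRECONDITION & SPEC =====
-- Pre_ excludes exactly the inputs where the Python A raises ZeroDivisionError: a nonempty
-- title list together with a space-stripped toc_title or article title that is empty (the
-- shorter string then has length 0).  B raises there too.
def Pre_extract_best_match_title (toc_title : String) (article_titles : List String) : Prop :=
  (article_titles = [] ∨ (PySem.Str.replace toc_title " " "").toList ≠ []) ∧
  ∀ t ∈ article_titles, (PySem.Str.replace t " " "").toList ≠ []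
instance (toc_title : String) (article_titles : List String) : Decidable (Pre_extract_best_match_title toc_title article_titles) := by unfold Pre_extract_best_match_title; infer_instance
def pvWitness_extract_best_match_title : String × List String := ("ab c", ["abd", "xy"])

def Spec_extract_best_match_title (toc_title : String) (article_titles : List String) (out : Option String) : Prop := out = extract_best_match_title_alt toc_title article_titles
instance (toc_title : String) (article_titles : List String) (out : Option String) : Decidable (Spec_extract_best_match_title toc_title article_titles out) := by unfold Spec_extract_best_match_title; infer_instance

-- ===== CLAIM (what is proved, stated in full; the proofs are below) =====
def Claim_equal_extract_best_match_title : Prop := ∀ (toc_title : String) (article_titles : List String), Dom_extract_best_match_title toc_title article_titles → Pre_extract_best_match_title toc_title article_titles → Spec_extract_best_match_title toc_title article_titles (extract_best_match_title toc_title article_titles)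

-- ===== LEMMAS AND PROOFS =====

-- The common greedy-count specification: pvGCount bs need = how many leading characters of
-- `need` are matched scanning bs left to right.
def pvGCount : List Char → List Char → Nat
  | _, [] => 0
  | [], _ :: _ => 0
  | y :: l, x :: t => if y = x then 1 + pvGCount l t else pvGCount l (x :: t)

theorem pvGCount_nil_need (l : List Char) : pvGCount l [] = 0 := by
  cases l <;> rfl

theorem pvGCount_not_mem {l : List Char} {ch : Char} (t : List Char) (h : ch ∉ l) :
    pvGCount l (ch :: t) = 0 := by
  induction l with
  | nil => rfl
  | cons y l ih =>
    simp only [List.mem_cons, not_or] at h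
    simp [pvGCount, Ne.symm h.1, ih h.2]

theorem pvGCount_first {l : List Char} {ch : Char} {k : Nat} (t : List Char)
    (hk : l[k]? = some ch) (hfirst : ∀ j < k, l[j]? ≠ some ch) :
    pvGCount l (ch :: t) = 1 + pvGCount (l.drop (k + 1)) t := by
  induction l generalizing k with
  | nil => simp at hk
  | cons y l ih =>
    cases k with
    | zero =>
      simp only [List.getElem?_cons_zero, Option.some.injEq] at hk
      simp [pvGCount, hk]
    | succ k =>
      have hy : y ≠ ch := by
        intro h
        exact hfirst 0 (Nat.succ_pos _) (by simp [h])
      simp only [List.getElem?_cons_succ] at hk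
      have := ih hk (fun j hj => hfirst (j + 1) (by omega) ∘ (by simp))
      simpa [pvGCount, hy] using this

theorem pvSingletonPrefix (a : Char) (xs : List Char) : [a] <+: xs ↔ xs.head? = some a := by
  cases xs <;> simp [List.cons_prefix_iff]

theorem pvSingletonInfix (ch : Char) (l : List Char) : [ch] <:+: l ↔ ch ∈ l := by
  constructor
  · intro h; exact List.singleton_sublist.mp h.sublist
  · intro h
    obtain ⟨s, t, rfl⟩ := List.append_of_mem h
    exact ⟨s, t, by simp⟩

theorem pvMatch_eq (need l : List Char) : pvMatch l need = pvGCount l need := by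
  induction need generalizing l with
  | nil => simp [pvMatch, pvGCount_nil_need]
  | cons ch t ih =>
    unfold pvMatch
    by_cases hneg : PySem.Chars.find l [ch] < 0
    · have h1 : PySem.Chars.find l [ch] = -1 := by
        have := PySem.Chars.neg_one_le_find l [ch]
        omega
      have h2 : ch ∉ l := by
        have := (PySem.Chars.find_eq_neg_one_iff l [ch]).mp h1
        exact fun hm => this ((pvSingletonInfix ch l).mpr hm)
      simp [hneg, pvGCount_not_mem t h2]
    · push Not at hneg
      obtain ⟨hpre, hfirst⟩ := PySem.Chars.find_spec hneg
      set k := PySem.Chars.find l [ch] with hk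
      have hget : l[k.toNat]? = some ch := by
        have := (pvSingletonPrefix ch (l.drop k.toNat)).mp hpre
        simpa [List.head?_drop] using this
      have hnone : ∀ j < k.toNat, l[j]? ≠ some ch := by
        intro j hj hsome
        exact hfirst j hj ((pvSingletonPrefix ch (l.drop j)).mpr (by simpa [List.head?_drop] using hsome))
      have hsl : PySem.List.slice l (some (k + 1)) none = l.drop (k.toNat + 1) := by
        rw [PySem.List.slice_from l (by omega : (0:Int) ≤ k + 1)]
        congr 1
        omega
      rw [if_neg (by omega), hsl, ih, pvGCount_first t hget hnone]

-- A's inner loop (fold over the characters of b) computes m ⊔ (c + pvGCount bs (a.drop (i+cn))).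
theorem pvInnerA (a : List Char) (i : Nat) :
    ∀ (bs : List Char) (m : Int) (cn : Nat), (cn : Int) ≤ m →
      bs.foldl
        (fun (st : Int × Int) ch =>
          if (a.length : Int) ≤ (i : Int) + st.2 then st
          else if PySem.List.pyGetD a ((i : Int) + st.2) ' ' == ch then
            (max st.1 (st.2 + 1), st.2 + 1)
          else st)
        (m, (cn : Int)) =
      (max m ((cn : Int) + pvGCount bs (a.drop (i + cn))),
       (cn : Int) + pvGCount bs (a.drop (i + cn))) := by
  intro bs
  induction bs with
  | nil =>
    intro m cn hcm
    have h0 : pvGCount [] (a.drop (i + cn)) = 0 := by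
      cases a.drop (i + cn) <;> rfl
    simp only [List.foldl_nil, h0]
    refine Prod.ext ?_ ?_ <;> omega
  | cons ch bs ih =>
    intro m cn hcm
    simp only [List.foldl_cons]
    by_cases hbig : (a.length : Int) ≤ (i : Int) + (cn : Int)
    · rw [if_pos hbig]
      have hdrop : a.drop (i + cn) = [] := by
        apply List.drop_eq_nil_of_le
        omega
      have h0 : pvGCount bs (a.drop (i + cn)) = 0 := by
        rw [hdrop]; cases bs <;> rfl
      have h1 : pvGCount (ch :: bs) (a.drop (i + cn)) = 0 := by rw [hdrop]; rfl
      rw [ih m cn hcm, h0, h1]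
    · rw [if_neg hbig]
      have hlt : i + cn < a.length := by omega
      have hdrop : a.drop (i + cn) = a[i + cn] :: a.drop (i + cn + 1) :=
        List.drop_eq_getElem_cons hlt
      have hgd : PySem.List.pyGetD a ((i : Int) + (cn : Int)) ' ' = a[i + cn] := by
        rw [PySem.List.pyGetD_eq_getElem a ' ' (by omega) (by omega)]
        have : ((i : Int) + (cn : Int)).toNat = i + cn := by omega
        simp only [this]
      by_cases heq : a[i + cn] = ch
      · rw [if_pos (by simp [hgd, heq])]
        have hc1 : ((cn : Int) + 1) = ((cn + 1 : Nat) : Int) := by omega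
        have := ih (max m ((cn : Int) + 1)) (cn + 1)
          (by exact_mod_cast le_max_right m ((cn : Int) + 1))
        rw [hc1] at this
        rw [hc1, this]
        have hg : pvGCount (ch :: bs) (a.drop (i + cn)) =
            1 + pvGCount bs (a.drop (i + (cn + 1))) := by
          rw [hdrop]
          have : i + cn + 1 = i + (cn + 1) := by omega
          simp [pvGCount, heq, this]
        rw [hg]
        refine Prod.ext ?_ ?_ <;> omega
      · rw [if_neg (by simp [hgd]; exact heq)]
        rw [ih m cn hcm]
        have hg : pvGCount (ch :: bs) (a.drop (i + cn)) =
            pvGCount bs (a.drop (i + cn)) := by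
          conv_lhs => rw [hdrop]
          have : ch = a[i + cn] ↔ False := by
            constructor
            · exact fun h => heq h.symm
            · exact False.elim
          rw [pvGCount, if_neg (fun h => heq h.symm)]
          rw [hdrop]
        rw [hg]

theorem pvOuterAux (a b : List Char) :
    ∀ (idx : List Int) (m : Int), 0 ≤ m → (∀ i ∈ idx, 0 ≤ i) →
      idx.foldl
        (fun maxc i =>
          ((PySem.List.pyRange 0 b.length 1).foldl
            (fun (st : Int × Int) j =>
              if (a.length : Int) ≤ i + st.2 then st
              else if PySem.List.pyGetD a (i + st.2) ' ' == PySem.List.pyGetD b j ' ' then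
                (max st.1 (st.2 + 1), st.2 + 1)
              else st)
            (maxc, (0 : Int))).1)
        m =
      idx.foldl
        (fun best i => max best ((pvMatch b (PySem.List.slice a (some i) none) : Nat) : Int))
        m := by
  intro idx
  induction idx with
  | nil => intro m _ _; rfl
  | cons i idx ih =>
    intro m hm hmem
    have hi0 : 0 ≤ i := (hmem i (by simp))
    simp only [List.foldl_cons]
    have hstep :
        ((PySem.List.pyRange 0 b.length 1).foldl
          (fun (st : Int × Int) j =>
            if (a.length : Int) ≤ i + st.2 then st
            else if PySem.List.pyGetD a (i + st.2) ' ' == PySem.List.pyGetD b j ' ' then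
              (max st.1 (st.2 + 1), st.2 + 1)
            else st)
          (m, (0 : Int))).1 =
        max m ((pvMatch b (PySem.List.slice a (some i) none) : Nat) : Int) := by
      rw [show i = ((i.toNat : Nat) : Int) by omega]
      rw [PySem.List.foldl_pyRange_zero_pyGetD' b ' '
        (fun (st : Int × Int) ch =>
          if (a.length : Int) ≤ ((i.toNat : Nat) : Int) + st.2 then st
          else if PySem.List.pyGetD a (((i.toNat : Nat) : Int) + st.2) ' ' == ch then
            (max st.1 (st.2 + 1), st.2 + 1)
          else st)
        (m, (0 : Int))]
      have hinner := pvInnerA a i.toNat b m 0 (by omega)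
      simp only [Nat.cast_zero, Nat.add_zero, zero_add] at hinner
      rw [hinner]
      rw [PySem.List.slice_from a (by omega : (0 : Int) ≤ ((i.toNat : Nat) : Int))]
      rw [pvMatch_eq]
      simp only [Int.toNat_natCast]
    rw [hstep]
    exact ih _ (le_max_of_le_left hm) (fun j hj => hmem j (by simp [hj]))

theorem pvCalcSim (a b : List Char) :
    pvIntRatio100
      ((PySem.List.pyRange 0 a.length 1).foldl
        (fun maxc i =>
          ((PySem.List.pyRange 0 b.length 1).foldl
            (fun (st : Int × Int) j =>
              if (a.length : Int) ≤ i + st.2 then st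
              else if PySem.List.pyGetD a (i + st.2) ' ' == PySem.List.pyGetD b j ' ' then
                (max st.1 (st.2 + 1), st.2 + 1)
              else st)
            (maxc, (0 : Int))).1)
        (0 : Int)) (a.length : Int) =
    pvIntRatio100
      ((PySem.List.pyRange 0 a.length 1).foldl
        (fun best i => max best ((pvMatch b (PySem.List.slice a (some i) none) : Nat) : Int))
        (0 : Int)) (a.length : Int) :=
  congrArg (fun z => pvIntRatio100 z (a.length : Int))
    (pvOuterAux a b (PySem.List.pyRange 0 a.length 1) 0 le_rfl
      (fun _ hi => (PySem.List.mem_pyRange_one.mp hi).1))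

theorem pvCalc_eq (s1 s2 : String) : pvCalcA s1 s2 = pvSimB s1 s2 := by
  unfold pvCalcA pvSimB
  exact pvCalcSim _ _

theorem pvIntRatio100_nonneg (m n : Int) : 0 ≤ pvIntRatio100 m n := by
  unfold pvIntRatio100
  dsimp only
  split_ifs <;> positivity

theorem pvSimB_nonneg (s1 s2 : String) : 0 ≤ pvSimB s1 s2 := by
  unfold pvSimB
  exact pvIntRatio100_nonneg _ _

-- the two entry folds
def pvFoldA (f : String → Int) (ts : List String) (st : Int × Option String) : Int × Option String :=
  ts.foldl (fun st t => if st.1 < f t then (f t, some t) else st) st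

def pvFoldB (f : String → Int) (ts : List String) (acc : Option (Int × String)) : Option (Int × String) :=
  ts.foldl
    (fun acc t =>
      match acc with
      | none => some (f t, t)
      | some m => if m.1 < f t then some (f t, t) else some m)
    acc

theorem pvLockstep (f : String → Int) :
    ∀ (ts : List String) (m : Int) (c : String),
      pvFoldB f ts (some (m, c)) =
        some ((pvFoldA f ts (m, some c)).1, ((pvFoldA f ts (m, some c)).2).getD c) ∧
      (pvFoldA f ts (m, some c)).2.isSome ∧ m ≤ (pvFoldA f ts (m, some c)).1 := by
  intro ts
  induction ts with
  | nil => intro m c; simp [pvFoldA, pvFoldB]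
  | cons t ts ih =>
    intro m c
    by_cases h : m < f t
    · have hstepB : pvFoldB f (t :: ts) (some (m, c)) = pvFoldB f ts (some (f t, t)) := by
        simp [pvFoldB, h]
      have hstepA : pvFoldA f (t :: ts) (m, some c) = pvFoldA f ts (f t, some t) := by
        simp [pvFoldA, h]
      obtain ⟨hB, hsome, hle⟩ := ih (f t) t
      obtain ⟨y, hy⟩ := Option.isSome_iff_exists.mp hsome
      rw [hstepB, hstepA]
      exact ⟨by rw [hB, hy]; simp, hsome, le_trans (le_of_lt h) hle⟩
    · have hstepB : pvFoldB f (t :: ts) (some (m, c)) = pvFoldB f ts (some (m, c)) := by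
        simp [pvFoldB, h]
      have hstepA : pvFoldA f (t :: ts) (m, some c) = pvFoldA f ts (m, some c) := by
        simp [pvFoldA, h]
      rw [hstepB, hstepA]
      exact ih m c

theorem pvZeroPhase (f : String → Int) (hf : ∀ t, 0 ≤ f t) :
    ∀ (ts : List String) (c : String),
      ∃ q : Int × String,
        pvFoldB f ts (some (0, c)) = some q ∧ 0 ≤ q.1 ∧
        (pvFoldA f ts (0, none)).1 = q.1 ∧
        ((pvFoldA f ts (0, none)).2 = some q.2 ∨
          (q.1 = 0 ∧ (pvFoldA f ts (0, none)).2 = none)) := by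
  intro ts
  induction ts with
  | nil =>
    intro c
    exact ⟨(0, c), by simp [pvFoldA, pvFoldB]⟩
  | cons t ts ih =>
    intro c
    by_cases h : (0 : Int) < f t
    · obtain ⟨hB, hsome, hle⟩ := pvLockstep f ts (f t) t
      obtain ⟨y, hy⟩ := Option.isSome_iff_exists.mp hsome
      have hstepB : pvFoldB f (t :: ts) (some (0, c)) = pvFoldB f ts (some (f t, t)) := by
        simp [pvFoldB, h]
      have hstepA : pvFoldA f (t :: ts) (0, none) = pvFoldA f ts (f t, some t) := by
        simp [pvFoldA, h]
      refine ⟨((pvFoldA f ts (f t, some t)).1, ((pvFoldA f ts (f t, some t)).2).getD t), ?_, ?_, ?_, ?_⟩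
      · rw [hstepB]
        exact hB
      · exact le_trans (le_of_lt h) hle
      · rw [hstepA]
      · left
        rw [hstepA]
        simp [hy]
    · have h0 : f t = 0 := le_antisymm (not_lt.mp h) (hf t)
      obtain ⟨q, hB, hq0, hfst, hdisj⟩ := ih c
      have hstepB : pvFoldB f (t :: ts) (some (0, c)) = pvFoldB f ts (some (0, c)) := by
        simp [pvFoldB, h]
      have hstepA : pvFoldA f (t :: ts) (0, none) = pvFoldA f ts (0, none) := by
        simp [pvFoldA, h]
      refine ⟨q, ?_, hq0, ?_, ?_⟩
      · rw [hstepB]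
        exact hB
      · rw [hstepA]
        exact hfst
      · rw [hstepA]
        exact hdisj

theorem pvMaxEq (g : String → Int) (ts : List String) :
    PySem.List.max? (ts.map (fun t => (g t, t))) (fun p => p.1) = pvFoldB g ts none := by
  unfold PySem.List.max? pvFoldB
  rw [List.foldl_map]
  congr 1
  funext acc t
  cases acc <;> rfl

theorem pvEntry (f : String → Int) (hf : ∀ t, 0 ≤ f t) (ts : List String) :
    (if (40 : Int) ≤ (pvFoldA f ts (0, none)).1 then (pvFoldA f ts (0, none)).2 else none) =
    (if ts.isEmpty then none
     else
       match pvFoldB f ts none with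
       | none => none
       | some p => if (40 : Int) ≤ p.1 then some p.2 else none) := by
  cases ts with
  | nil => simp [pvFoldA]
  | cons t ts =>
    simp only [List.isEmpty_cons, Bool.false_eq_true, if_false]
    have hBstart : pvFoldB f (t :: ts) none = pvFoldB f ts (some (f t, t)) := by
      simp [pvFoldB]
    by_cases h : (0 : Int) < f t
    · have hAstart : pvFoldA f (t :: ts) (0, none) = pvFoldA f ts (f t, some t) := by
        simp [pvFoldA, if_pos h]
      obtain ⟨hB, hsome, hle⟩ := pvLockstep f ts (f t) t
      obtain ⟨y, hy⟩ := Option.isSome_iff_exists.mp hsome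
      rw [hAstart, hBstart, hB]
      by_cases h40 : (40 : Int) ≤ (pvFoldA f ts (f t, some t)).1
      · simp [h40, hy]
      · simp [h40]
    · have h0 : f t = 0 := le_antisymm (not_lt.mp h) (hf t)
      have hAstart : pvFoldA f (t :: ts) (0, none) = pvFoldA f ts (0, none) := by
        simp [pvFoldA, if_neg h]
      obtain ⟨q, hB, hq0, hfst, hdisj⟩ := pvZeroPhase f hf ts t
      rw [hAstart, hBstart, h0, hB]
      rcases hdisj with hA2 | ⟨hq1, hA2⟩
      · by_cases h40 : (40 : Int) ≤ q.1
        · simp [hfst, h40, hA2]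
        · simp [hfst, h40]
      · have : ¬ (40 : Int) ≤ q.1 := by omega
        simp [hfst, this]

-- ===== VERDICT (by name: the statement is the Claim_ definition above) =====
theorem extract_best_match_title_spec : Claim_equal_extract_best_match_title := by
  intro toc_title article_titles _hdom _hpre
  unfold Spec_extract_best_match_title extract_best_match_title extract_best_match_title_alt
  simp only [pvCalc_eq, pvMaxEq]
  exact pvEntry (fun t => pvSimB toc_title t) (fun t => pvSimB_nonneg toc_title t) article_titles
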